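-- pv_equiv track=rewrite | github.com/max7969/adventofcode2024 | day15/day15.py | complete_content
-- ===== SOURCE A (Python) =====
-- def complete_content(content):
--     new_content = []
--     for line in content:
--         new_line = ''
--         for element in line:
--             if element == '@':
--                 new_line += '@.'
--             elif element == '#':
--                 new_line += '##'
--             elif element == '.':
--                 new_line += '..'
--             elif element == 'O':
--                 new_line += '[]'
--             else:
--                 new_line += element
--         new_content.append(new_line)
--     return new_content
-- ===== SOURCE B (Python) =====
-- def complete_content(content):
--     # Four whole-line substitution passes; order chosen so no pass re-expands
--     # characters introduced by an earlier pass ('@.' is produced last).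
--     return [line.replace('#', '##')
--                 .replace('O', '[]')
--                 .replace('.', '..')
--                 .replace('@', '@.')
--             for line in content]
-- ===== Notes on version B (the rewrite author's own statement) =====
-- stated objective: idiomatic
-- what changed: Replaces A's single char-by-char pass with an if/elif chain by four staged whole-line str.replace passes (one per mapped character), ordered so later passes never re-expand text introduced by earlier ones; the per-character Python loop disappears into C-level string scans.
import Mathlib
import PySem

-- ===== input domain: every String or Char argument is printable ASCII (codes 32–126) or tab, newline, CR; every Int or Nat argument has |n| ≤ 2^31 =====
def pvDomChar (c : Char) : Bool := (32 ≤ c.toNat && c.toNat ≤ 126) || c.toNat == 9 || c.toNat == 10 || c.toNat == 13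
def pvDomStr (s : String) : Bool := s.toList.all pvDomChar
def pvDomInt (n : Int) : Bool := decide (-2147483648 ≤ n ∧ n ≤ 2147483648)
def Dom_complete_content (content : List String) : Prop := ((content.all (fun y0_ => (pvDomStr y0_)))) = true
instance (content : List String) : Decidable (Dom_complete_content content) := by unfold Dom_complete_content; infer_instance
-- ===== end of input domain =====

-- B replaces A's single char-by-char pass with four staged whole-line str.replace passes, ordered so later passes never re-expand text from earlier ones (idiomatic).


-- ===== PORT A =====
-- inner loop: new_line += <expansion of element>, branch chain in A's order
def ccExpandA (c : Char) : List Char :=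
  if c = '@' then ['@', '.']
  else if c = '#' then ['#', '#']
  else if c = '.' then ['.', '.']
  else if c = 'O' then ['[', ']']
  else [c]

def complete_content (content : List String) : List String :=
  content.foldl
    (fun new_content line =>
      new_content ++
        [String.ofList (line.toList.foldl (fun new_line c => new_line ++ ccExpandA c) [])])
    []

-- ===== PORT B =====
-- four staged whole-line replace passes, in Source B's order
def complete_content_alt (content : List String) : List String :=
  content.map (fun line =>
    PySem.Str.replace
      (PySem.Str.replace
        (PySem.Str.replace
          (PySem.Str.replace line "#" "##") "O" "[]") "." "..") "@" "@.")

-- ===== PRECONDITION & SPEC =====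
def Spec_complete_content (content : List String) (out : List String) : Prop := out = complete_content_alt content
instance (content : List String) (out : List String) : Decidable (Spec_complete_content content out) := by unfold Spec_complete_content; infer_instance

-- ===== CLAIM (what is proved, stated in full; the proofs are below) =====
def Claim_equal_complete_content : Prop := ∀ (content : List String), Dom_complete_content content → Spec_complete_content content (complete_content content)

-- ===== LEMMAS AND PROOFS =====
-- single-character replace is a flatMap
lemma replace_go_single (a : Char) (new : List Char) :
    ∀ (l : List Char) (fuel : Nat) (acc : List Char), l.length ≤ fuel →
      PySem.Chars.replace.go [a] new fuel l acc
        = acc.reverse ++ l.flatMap (fun c => if c = a then new else [c]) := by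
  intro l
  induction l with
  | nil =>
      intro fuel acc _
      cases fuel <;> simp [PySem.Chars.replace.go]
  | cons c t ih =>
      intro fuel acc hle
      cases fuel with
      | zero => simp at hle
      | succ n =>
          by_cases hca : c = a
          · subst hca
            have hpre : List.isPrefixOf [c] (c :: t) = true := by
              simp [List.isPrefixOf]
            rw [PySem.Chars.replace.go, if_pos hpre]
            have hd : List.drop [c].length (c :: t) = t := rfl
            simp only [List.length_cons] at hle
            rw [hd, ih n (new.reverse ++ acc) (by omega)]
            simp
          · have hpre : List.isPrefixOf [a] (c :: t) = false := by
              simp [List.isPrefixOf]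
              exact fun h => absurd h.symm hca
            rw [PySem.Chars.replace.go, if_neg (by simp [hpre])]
            simp only [List.length_cons] at hle
            rw [ih n (c :: acc) (by omega)]
            simp [hca]

lemma replace_single (a : Char) (new : List Char) (s : List Char) :
    PySem.Chars.replace s [a] new = s.flatMap (fun c => if c = a then new else [c]) := by
  unfold PySem.Chars.replace
  rw [if_neg (by simp [List.isEmpty])]
  simpa using replace_go_single a new s s.length [] (le_refl _)

-- the composite of the four single-char substitutions, characterwise
lemma composite_eq (c : Char) :
    ((((if c = '#' then ['#','#'] else [c]).flatMap
        (fun d => if d = 'O' then ['[',']'] else [d])).flatMap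
        (fun d => if d = '.' then ['.','.'] else [d])).flatMap
        (fun d => if d = '@' then ['@','.'] else [d]))
      = ccExpandA c := by
  by_cases h1 : c = '@'
  · subst h1; decide
  · by_cases h2 : c = '#'
    · subst h2; decide
    · by_cases h3 : c = '.'
      · subst h3; decide
      · by_cases h4 : c = 'O'
        · subst h4; decide
        · simp [ccExpandA, h1, h2, h3, h4]

lemma b_line_toList (line : String) :
    (PySem.Str.replace
      (PySem.Str.replace
        (PySem.Str.replace
          (PySem.Str.replace line "#" "##") "O" "[]") "." "..") "@" "@.").toList
      = line.toList.flatMap ccExpandA := by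
  rw [PySem.Str.toList_replace, PySem.Str.toList_replace, PySem.Str.toList_replace,
      PySem.Str.toList_replace]
  show PySem.Chars.replace (PySem.Chars.replace (PySem.Chars.replace
        (PySem.Chars.replace line.toList ['#'] ['#','#']) ['O'] ['[',']'])
        ['.'] ['.','.']) ['@'] ['@','.'] = _
  rw [replace_single, replace_single, replace_single, replace_single,
      List.flatMap_assoc, List.flatMap_assoc, List.flatMap_assoc]
  exact List.flatMap_congr (fun c _ => by
    simpa [List.flatMap_assoc] using composite_eq c)

lemma inner_eq (line : String) :
    line.toList.foldl (fun new_line c => new_line ++ ccExpandA c) []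
      = line.toList.flatMap ccExpandA := by
  rw [PySem.List.foldl_append_eq_flatMap]
  simp

-- ===== VERDICT (by name: the statement is the Claim_ definition above) =====
theorem complete_content_spec : Claim_equal_complete_content := by
  intro content _
  unfold Spec_complete_content complete_content complete_content_alt
  rw [PySem.List.foldl_append_singleton_eq_map]
  refine List.map_congr_left (fun line _ => ?_)
  have : (PySem.Str.replace
      (PySem.Str.replace
        (PySem.Str.replace
          (PySem.Str.replace line "#" "##") "O" "[]") "." "..") "@" "@.").toList
      = line.toList.flatMap ccExpandA := b_line_toList line
  rw [inner_eq, ← this, String.ofList_toList]
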